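-- pv_equiv track=rewrite | github.com/Hypnopompia/aoc2023 | 11/main_2.py | galaxies
-- ===== SOURCE A (Python) =====
-- def galaxies(universe, emptyCols, emptyRows, expandFactor):
--     galaxies = []
--     for y, row in enumerate(universe):
--         previousEmptyRows = len([i for i in emptyRows if i < y])
--         for x, point in enumerate(row):
--             previousEmptyCols = len([i for i in emptyCols if i < x])
--             if point == '#':
--                 galaxy_x = x + (previousEmptyCols * expandFactor) - previousEmptyCols
--                 galaxy_y = y + (previousEmptyRows * expandFactor) - previousEmptyRows
--                 galaxies.append((galaxy_x, galaxy_y))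
--     return galaxies
-- ===== SOURCE B (Python) =====
-- def _offsets(values, n):
--     # prefix counts: offs[x] = number of values < x, for x in range(n)
--     counts = {}
--     acc = 0
--     for v in values:
--         if v < 0:
--             acc += 1
--         elif v < n:
--             counts[v] = counts.get(v, 0) + 1
--     offs = []
--     for x in range(n):
--         offs.append(acc)
--         acc += counts.get(x, 0)
--     return offs
--
--
-- def galaxies(universe, emptyCols, emptyRows, expandFactor):
--     growth = expandFactor - 1
--     rowOff = _offsets(emptyRows, len(universe))
--     width = 0
--     for row in universe:
--         if len(row) > width:
--             width = len(row)
--     colOff = _offsets(emptyCols, width)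
--     result = []
--     for y, row in enumerate(universe):
--         dy = y + rowOff[y] * growth
--         for x, ch in enumerate(row):
--             if ch == '#':
--                 result.append((x + colOff[x] * growth, dy))
--     return result
-- ===== Notes on version B (the rewrite author's own statement) =====
-- stated objective: faster
-- what changed: Instead of recounting the empty rows/cols below each coordinate with a filter pass per cell, B builds prefix-count offset tables once (a dict of multiplicities, then a running-sum scan) and does O(1) lookups per cell.
import Mathlib
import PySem

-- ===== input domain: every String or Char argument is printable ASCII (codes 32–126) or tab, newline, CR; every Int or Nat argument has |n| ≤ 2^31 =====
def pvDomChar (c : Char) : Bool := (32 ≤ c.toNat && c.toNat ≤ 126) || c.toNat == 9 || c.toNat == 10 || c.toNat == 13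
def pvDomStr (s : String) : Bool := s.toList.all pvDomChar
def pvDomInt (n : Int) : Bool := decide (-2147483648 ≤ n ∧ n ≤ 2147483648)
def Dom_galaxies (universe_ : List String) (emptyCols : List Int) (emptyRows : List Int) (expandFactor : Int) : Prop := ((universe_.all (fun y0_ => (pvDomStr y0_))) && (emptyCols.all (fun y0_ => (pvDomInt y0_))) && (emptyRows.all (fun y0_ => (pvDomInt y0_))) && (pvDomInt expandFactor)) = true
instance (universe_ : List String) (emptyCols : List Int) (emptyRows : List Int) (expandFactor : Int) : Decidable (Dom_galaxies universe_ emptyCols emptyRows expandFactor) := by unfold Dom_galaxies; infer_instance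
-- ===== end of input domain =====

-- ===== PORT A =====
-- B replaces A's per-cell recount of empty rows/cols with prefix-count offset tables built once (objective: faster, asymptotic).
def galaxies (universe_ : List String) (emptyCols : List Int) (emptyRows : List Int) (expandFactor : Int) : List (Int × Int) :=
  (PySem.List.enumerate universe_).foldl (fun gs p =>
    let y : Int := p.1
    let previousEmptyRows : Int := (emptyRows.filter (fun i => i < y)).length
    (PySem.List.enumerate p.2.toList).foldl (fun gs2 q =>
      let x : Int := q.1
      let previousEmptyCols : Int := (emptyCols.filter (fun i => i < x)).length
      if q.2 == '#' then
        gs2 ++ [(x + previousEmptyCols * expandFactor - previousEmptyCols,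
                 y + previousEmptyRows * expandFactor - previousEmptyRows)]
      else gs2) gs) []

-- ===== PORT B =====
-- B helper: offs[x] = number of values < x, for x in range(n) (multiplicity dict, then running-sum scan)
def pvOffsets (values : List Int) (n : Int) : List Int :=
  let st := values.foldl (fun (st : PySem.Dict Int Int × Int) v =>
      if v < 0 then (st.1, st.2 + 1)
      else if v < n then (st.1.modify v 0 (· + 1), st.2)
      else st) (PySem.Dict.empty, 0)
  ((PySem.List.pyRange 0 n 1).foldl (fun (st2 : List Int × Int) x =>
      (st2.1 ++ [st2.2], st2.2 + st.1.getD x 0)) ([], st.2)).1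

-- Port of B: prefix-count offset tables built once, O(1) lookup per cell.
def galaxies_alt (universe_ : List String) (emptyCols : List Int) (emptyRows : List Int) (expandFactor : Int) : List (Int × Int) :=
  let growth := expandFactor - 1
  let rowOff := pvOffsets emptyRows (universe_.length : Int)
  let width := universe_.foldl (fun w row => if PySem.Str.len row > w then PySem.Str.len row else w) 0
  let colOff := pvOffsets emptyCols width
  (PySem.List.enumerate universe_).foldl (fun res p =>
    let dy : Int := p.1 + (PySem.List.pyGetD rowOff p.1 0) * growth
    (PySem.List.enumerate p.2.toList).foldl (fun res2 q =>
      if q.2 == '#' then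
        res2 ++ [(q.1 + (PySem.List.pyGetD colOff q.1 0) * growth, dy)]
      else res2) res) []

-- ===== PRECONDITION & SPEC =====
def Spec_galaxies (universe_ : List String) (emptyCols : List Int) (emptyRows : List Int) (expandFactor : Int) (out : List (Int × Int)) : Prop := out = galaxies_alt universe_ emptyCols emptyRows expandFactor
instance (universe_ : List String) (emptyCols : List Int) (emptyRows : List Int) (expandFactor : Int) (out : List (Int × Int)) : Decidable (Spec_galaxies universe_ emptyCols emptyRows expandFactor out) := by unfold Spec_galaxies; infer_instance

-- ===== CLAIM (what is proved, stated in full; the proofs are below) =====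
def Claim_equal_galaxies : Prop := ∀ (universe_ : List String) (emptyCols : List Int) (emptyRows : List Int) (expandFactor : Int), Dom_galaxies universe_ emptyCols emptyRows expandFactor → Spec_galaxies universe_ emptyCols emptyRows expandFactor (galaxies universe_ emptyCols emptyRows expandFactor)

-- ===== LEMMAS AND PROOFS =====

-- splitting a strict-bound count at x
theorem pv_count_split (l : List Int) (x : Int) :
    l.countP (fun v => decide (v < x + 1)) = l.countP (fun v => decide (v < x)) + l.count x := by
  induction l with
  | nil => simp
  | cons a t ih =>
    simp only [List.countP_cons, List.count_cons, ih]
    by_cases h1 : a < x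
    · have h2 : a < x + 1 := by omega
      have h3 : a ≠ x := by omega
      simp [h1, h2, h3]; omega
    · by_cases h4 : a = x
      · subst h4; simp; omega
      · have h5 : ¬ a < x + 1 := by omega
        simp [h1, h4, h5]

-- the first pass of pvOffsets: the dict counts the in-range values, the int counts the negatives
theorem pv_offsets_pass1 (n : Int) (values : List Int) (st0 : PySem.Dict Int Int × Int) :
    values.foldl (fun (st : PySem.Dict Int Int × Int) v =>
      if v < 0 then (st.1, st.2 + 1)
      else if v < n then (st.1.modify v 0 (· + 1), st.2)
      else st) st0
    = ((values.filter (fun v => decide (0 ≤ v) && decide (v < n))).foldl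
         (fun d v => d.modify v 0 (· + 1)) st0.1,
       st0.2 + (values.countP (fun v => decide (v < 0)) : Int)) := by
  induction values generalizing st0 with
  | nil => simp
  | cons a t ih =>
    simp only [List.foldl_cons, List.filter_cons, List.countP_cons]
    by_cases h1 : a < 0
    · have h2 : ¬ (0 ≤ a) := by omega
      simp only [h1, if_pos, h2]
      rw [ih]
      simp; ring_nf
    · have h2 : 0 ≤ a := by omega
      by_cases h3 : a < n
      · simp only [h1, h2, h3]
        rw [ih]
        simp
      · simp only [h1, h2, h3]
        rw [ih]
        simp

-- the second pass builds the list of prefix sums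
theorem pv_offsets_pass2_aux (cnt : Int → Int) (b : Int) (k : Nat) :
    ∀ (a : Int) (l : List Int) (acc : Int), b - a = (k : Int) + 1 →
    ((PySem.List.pyRange a b 1).foldl (fun (st2 : List Int × Int) x =>
        (st2.1 ++ [st2.2], st2.2 + cnt x)) (l, acc)).1
    = l ++ (PySem.List.pyRange a b 1).map
        (fun x => acc + ((PySem.List.pyRange a x 1).map cnt).sum) := by
  induction k with
  | zero =>
    intro a l acc hk
    have hb : b = a + 1 := by omega
    subst hb
    rw [PySem.List.pyRange_one_singleton]
    simp [PySem.List.pyRange_one_eq_nil (le_refl a)]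
  | succ m ih =>
    intro a l acc hk
    have hab : a < b := by omega
    rw [PySem.List.pyRange_one_cons hab]
    simp only [List.foldl_cons, List.map_cons]
    rw [ih (a + 1) (l ++ [acc]) (acc + cnt a) (by omega)]
    rw [PySem.List.pyRange_one_eq_nil (le_refl a)]
    simp only [List.map_nil, List.sum_nil, add_zero, List.append_assoc,
      List.singleton_append]
    congr 1
    congr 1
    apply List.map_congr_left
    intro x hx
    have hax : a < x := by
      have := (PySem.List.mem_pyRange_one.mp hx).1
      omega
    rw [PySem.List.pyRange_one_cons hax]
    simp only [List.map_cons, List.sum_cons]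
    ring

theorem pv_offsets_pass2 (cnt : Int → Int) (n : Int) :
    ((PySem.List.pyRange 0 n 1).foldl (fun (st2 : List Int × Int) x =>
        (st2.1 ++ [st2.2], st2.2 + cnt x)) ([], acc)).1
    = (PySem.List.pyRange 0 n 1).map
        (fun x => acc + ((PySem.List.pyRange 0 x 1).map cnt).sum) := by
  by_cases h : n ≤ 0
  · rw [PySem.List.pyRange_one_eq_nil h]; simp
  · have : ∃ k : Nat, n - 0 = (k : Int) + 1 := ⟨(n - 1).toNat, by omega⟩
    obtain ⟨k, hk⟩ := this
    exact pv_offsets_pass2_aux cnt n k 0 [] acc hk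

-- acc₀ + Σ_{t ∈ range(0,x)} count t = number of values < x, when x ≤ n
theorem pv_sum_counts (values : List Int) (n : Int) (k : Nat) (hk : (k : Int) ≤ n) :
    (values.countP (fun v => decide (v < 0)) : Int)
      + ((PySem.List.pyRange 0 (k : Int) 1).map
          (fun t => ((values.filter (fun v => decide (0 ≤ v) && decide (v < n))).count t : Int))).sum
    = (values.countP (fun v => decide (v < (k : Int))) : Int) := by
  induction k with
  | zero => simp [PySem.List.pyRange_one_eq_nil (le_refl (0 : Int))]
  | succ m ih =>
    have hm : (m : Int) ≤ n := by push_cast at hk ⊢; omega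
    have hstep := PySem.List.pyRange_one_succ_right (a := 0) (b := (m : Int)) (by positivity)
    push_cast
    rw [show ((m : Int) + 1) = (m : Int) + 1 from rfl, hstep]
    rw [List.map_append, List.sum_append]
    have hcnt : (values.filter (fun v => decide (0 ≤ v) && decide (v < n))).count (m : Int)
        = values.count (m : Int) := by
      apply List.count_filter
      simp; push_cast at hk; omega
    have hsplit := pv_count_split values (m : Int)
    have ihm := ih hm
    simp only [List.map_cons, List.map_nil, List.sum_cons, List.sum_nil, add_zero, hcnt]
    push_cast at ihm hsplit ⊢
    omega

-- the value of pvOffsets at an in-range index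
theorem pvOffsets_get (values : List Int) (n x : Int) (h0 : 0 ≤ x) (hx : x < n) :
    PySem.List.pyGetD (pvOffsets values n) x 0
    = ((values.filter (fun i => decide (i < x))).length : Int) := by
  unfold pvOffsets
  rw [pv_offsets_pass1]
  simp only
  rw [pv_offsets_pass2]
  rw [PySem.List.pyGetD_map_pyRange_of_nonneg _ _ _ _ h0 hx]
  have hxk : x = ((x.toNat : Nat) : Int) := by omega
  rw [← List.countP_eq_length_filter]
  rw [hxk]
  rw [← pv_sum_counts values n x.toNat (by omega)]
  rw [zero_add]
  congr 1
  refine congrArg List.sum (List.map_congr_left ?_)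
  intro t ht
  have ht' := PySem.List.mem_pyRange_one.mp ht
  rw [PySem.Dict.getD_foldl_modify_add_one]
  simp [PySem.Dict.getD_empty]

-- rewriting the running-max loop of galaxies_alt to 'max'
theorem pv_width_fun :
    (fun (w : Int) (row : String) => if PySem.Str.len row > w then PySem.Str.len row else w)
    = (fun (w : Int) (row : String) => max w (PySem.Str.len row)) := by
  funext w row
  split <;> omega

-- ===== VERDICT (by name: the statement is the Claim_ definition above) =====
theorem galaxies_spec : Claim_equal_galaxies := by
  intro universe_ emptyCols emptyRows expandFactor _
  unfold Spec_galaxies galaxies galaxies_alt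
  simp only
  rw [pv_width_fun]
  have hwidth := (PySem.List.le_foldl_max_int universe_ (fun r => PySem.Str.len r) 0).2
  apply PySem.List.foldl_congr_mem'
  intro p hp acc
  rw [PySem.List.mem_enumerate_iff] at hp
  obtain ⟨ky, hky, hpy⟩ := hp
  subst hpy
  simp only [zero_add]
  apply PySem.List.foldl_congr_mem'
  intro q hq acc2
  rw [PySem.List.mem_enumerate_iff] at hq
  obtain ⟨kx, hkx, hqx⟩ := hq
  subst hqx
  simp only [zero_add]
  have hrow : PySem.Str.len universe_[ky] ≤ universe_.foldl (fun w row => max w (PySem.Str.len row)) 0 :=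
    hwidth _ (List.getElem_mem hky)
  have hlen : PySem.Str.len universe_[ky] = (universe_[ky].toList.length : Int) := by
    simp [PySem.Str.len]
  rw [pvOffsets_get emptyRows (universe_.length : Int) (ky : Int) (by positivity) (by exact_mod_cast hky)]
  rw [pvOffsets_get emptyCols _ (kx : Int) (by positivity) (by omega)]
  split
  · congr 1
    congr 1
    simp only [Prod.mk.injEq]
    constructor <;> ring
  · rfl
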